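-- pv_equiv track=rewrite | github.com/IgnorantCopy/Python_exercise | AI_intro/lab2/ai.py | get_single_score
-- ===== SOURCE A (Python) =====
-- def get_single_score(score: list):
--     result1 = 0
--     result2 = 0
--     for i in score:
--         if i <= 10:
--             result1 += i
--         else:
--             if result2 == 0:
--                 result2 += i
--             else:
--                 result2 *= i * 10
--     return result1 + result2
-- ===== SOURCE B (Python) =====
-- def get_single_score(score: list):
--     small = [i for i in score if i <= 10]
--     big = [i for i in score if i > 10]
--     result1 = sum(small)
--     if not big:
--         result2 = 0
--     else:
--         result2 = big[0]
--         for x in big[1:]: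
--             result2 *= x * 10
--     return result1 + result2
-- ===== Notes on version B (the rewrite author's own statement) =====
-- stated objective: alternative
-- what changed: Replaces the single interleaved stateful loop (with a result2==0 flag) with a partition into small/big groups followed by two independent reductions: a sum over small and a seeded left fold over big.
import Mathlib
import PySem

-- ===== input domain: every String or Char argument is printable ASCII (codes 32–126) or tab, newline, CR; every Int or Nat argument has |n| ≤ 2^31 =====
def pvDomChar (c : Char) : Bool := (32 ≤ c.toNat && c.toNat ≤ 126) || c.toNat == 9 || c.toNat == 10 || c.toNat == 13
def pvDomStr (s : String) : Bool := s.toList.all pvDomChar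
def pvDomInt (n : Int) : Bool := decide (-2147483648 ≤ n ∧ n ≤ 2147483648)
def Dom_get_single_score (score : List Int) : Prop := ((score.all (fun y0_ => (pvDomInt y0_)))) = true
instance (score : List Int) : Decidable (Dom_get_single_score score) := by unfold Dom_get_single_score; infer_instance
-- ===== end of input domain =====

-- B replaces A's single interleaved stateful loop by a partition into small/big
-- groups followed by two independent reductions (sum; seeded left fold): alternative decomposition, same cost.


-- ===== PORT A =====
-- loop body of A: state (result1, result2)
def stepA (st : Int × Int) (i : Int) : Int × Int :=
  if i ≤ 10 then (st.1 + i, st.2)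
  else if st.2 == 0 then (st.1, st.2 + i)
  else (st.1, st.2 * (i * 10))

def get_single_score (score : List Int) : Int :=
  let st := score.foldl stepA (0, 0)
  st.1 + st.2

-- ===== PORT B =====
def get_single_score_alt (score : List Int) : Int :=
  let small := score.filter (fun i => i ≤ 10)
  let big := score.filter (fun i => i > 10)
  let result1 := small.foldl (· + ·) 0
  let result2 :=
    match big with
    | [] => 0
    | h :: t => t.foldl (fun acc x => acc * (x * 10)) h
  result1 + result2

-- ===== PRECONDITION & SPEC =====
def Spec_get_single_score (score : List Int) (out : Int) : Prop := out = get_single_score_alt score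
instance (score : List Int) (out : Int) : Decidable (Spec_get_single_score score out) := by unfold Spec_get_single_score; infer_instance

-- ===== CLAIM (what is proved, stated in full; the proofs are below) =====
def Claim_equal_get_single_score : Prop := ∀ (score : List Int), Dom_get_single_score score → Spec_get_single_score score (get_single_score score)

-- ===== LEMMAS AND PROOFS =====
theorem foldl_add_shift (l : List Int) (a : Int) :
    l.foldl (· + ·) a = a + l.foldl (· + ·) 0 := by
  induction l generalizing a with
  | nil => simp
  | cons x l ih =>
    simp only [List.foldl_cons]
    rw [ih (a + x), ih (0 + x)]
    ring

-- once result2 is positive, A's loop just multiplies by x*10 for each big x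
theorem loop_pos (l : List Int) (r1 r2 : Int) (h : 0 < r2) :
    l.foldl stepA (r1, r2) =
      (r1 + (l.filter (fun i => i ≤ 10)).foldl (· + ·) 0,
       (l.filter (fun i => i > 10)).foldl (fun acc x => acc * (x * 10)) r2) := by
  induction l generalizing r1 r2 with
  | nil => simp
  | cons i l ih =>
    by_cases hi : i ≤ 10
    · simp only [List.foldl_cons, List.filter_cons, stepA, hi, decide_true,
        show ¬ (i > 10) by omega, decide_false, Bool.false_eq_true, if_false, if_true]
      rw [ih _ _ h, foldl_add_shift _ (0 + i)]
      simp; ring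
    · have hr2 : (r2 == 0) = false := by simp; omega
      have hpos : 0 < r2 * (i * 10) := mul_pos h (by omega)
      simp only [List.foldl_cons, List.filter_cons, stepA, hr2, Bool.false_eq_true,
        if_false, show (i > 10) by omega, decide_true, if_true, hi, decide_false]
      rw [ih _ _ hpos]

theorem loop_zero (l : List Int) (r1 : Int) :
    l.foldl stepA (r1, 0) =
      (r1 + (l.filter (fun i => i ≤ 10)).foldl (· + ·) 0,
       match l.filter (fun i => i > 10) with
       | [] => 0
       | h :: t => t.foldl (fun acc x => acc * (x * 10)) h) := by
  induction l generalizing r1 with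
  | nil => simp
  | cons i l ih =>
    by_cases hi : i ≤ 10
    · simp only [List.foldl_cons, List.filter_cons, stepA, hi, decide_true,
        show ¬ (i > 10) by omega, decide_false, Bool.false_eq_true, if_false, if_true]
      rw [ih (r1 + i), foldl_add_shift _ (0 + i)]
      simp; ring
    · simp only [List.foldl_cons, List.filter_cons, stepA,
        show ((0 : Int) == 0) = true from rfl, if_true,
        show (i > 10) by omega, decide_true, hi, decide_false, Bool.false_eq_true, if_false]
      rw [loop_pos l r1 (0 + i) (by omega)]
      simp

-- ===== VERDICT (by name: the statement is the Claim_ definition above) =====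
theorem get_single_score_spec : Claim_equal_get_single_score := by
  intro score _
  unfold Spec_get_single_score get_single_score get_single_score_alt
  rw [loop_zero score 0]
  simp
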